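-- pv_equiv track=rewrite | github.com/boopdotpng/rdna-sim | scripts/gen_isa.py | build_typed_bases
-- ===== SOURCE A (Python) =====
-- from typing import Dict, List, Tuple
--
-- TYPE_SUFFIXES = ["f16", "f32", "bf16", "i8", "i16", "i32", "i64", "u8", "u16", "u32", "u64"]
--
-- def extract_base_and_type(name: str) -> tuple:
--   """
--   Extract operation base and data type from instruction name.
--
--   Examples:
--       v_add_f16 → ("v_add", "f16")
--       v_add_f32 → ("v_add", "f32")
--       v_and_b32 → ("v_and_b32", None)  # bitwise keeps suffix
--       s_mov_b32 → ("s_mov_b32", None)  # not a type variant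
--   """
--   for suffix in TYPE_SUFFIXES:
--     if name.endswith(f"_{suffix}"):
--       base = name[:-len(suffix)-1]
--       # Bitwise ops keep suffix (not genericizable)
--       if any(op in base for op in ["_and_", "_or_", "_xor_", "_not_"]):
--         return (name, None)
--       return (base, suffix)
--   return (name, None)
--
-- def instruction_category(name: str) -> str:
--   if name.startswith("v_"):
--     return "v"
--   if name.startswith("s_"):
--     return "s"
--   if name.startswith(("ds_", "buffer_", "flat_", "global_", "image_")):
--     return "mem"
--   return "misc"
--
-- def build_typed_bases(instructions: List[dict]) -> Dict[str, set]:
--   bases: Dict[str, Dict[str, set]] = {"v": {}, "s": {}, "mem": {}, "misc": {}}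
--   for inst in instructions:
--     name = inst["normalized_name"]
--     base, dtype = extract_base_and_type(name)
--     if not dtype:
--       continue
--     category = instruction_category(name)
--     bases.setdefault(category, {})
--     bases[category].setdefault(base, set()).add(dtype)
--   typed = {}
--   for category, base_map in bases.items():
--     typed[category] = {base for base, dtypes in base_map.items() if len(dtypes) > 1}
--   return typed
-- ===== SOURCE B (Python) =====
-- from typing import Dict, List, Tuple
--
-- TYPE_SUFFIXES = ["f16", "f32", "bf16", "i8", "i16", "i32", "i64", "u8", "u16", "u32", "u64"]
--
-- def extract_base_and_type(name: str) -> tuple: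
--   for suffix in TYPE_SUFFIXES:
--     if name.endswith(f"_{suffix}"):
--       base = name[:-len(suffix)-1]
--       if any(op in base for op in ["_and_", "_or_", "_xor_", "_not_"]):
--         return (name, None)
--       return (base, suffix)
--   return (name, None)
--
-- def instruction_category(name: str) -> str:
--   if name.startswith("v_"):
--     return "v"
--   if name.startswith("s_"):
--     return "s"
--   if name.startswith(("ds_", "buffer_", "flat_", "global_", "image_")):
--     return "mem"
--   return "misc"
--
-- def build_typed_bases(instructions: List[dict]) -> Dict[str, set]:
--   # One flat pass: remember each (category, base)'s first dtype; a key joins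
--   # `multi` the moment a different dtype shows up.  No nested dicts of dtype
--   # sets and no post-filter over them.
--   first_seen: Dict[Tuple[str, str], str] = {}
--   multi = set()
--   for inst in instructions:
--     name = inst["normalized_name"]
--     base, dtype = extract_base_and_type(name)
--     if not dtype:
--       continue
--     key = (instruction_category(name), base)
--     if key not in first_seen:
--       first_seen[key] = dtype
--     elif dtype != first_seen[key]:
--       multi.add(key)
--   typed = {c: set() for c in ("v", "s", "mem", "misc")}
--   for (category, base) in first_seen:
--     if (category, base) in multi:
--       typed[category].add(base)
--   return typed
-- ===== Notes on version B (the rewrite author's own statement) =====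
-- stated objective: simpler
-- what changed: Replaces the nested dict-of-dicts of full dtype sets plus the post-loop len>1 set-comprehension filter by one flat dict mapping (category, base) to its first dtype and a set of keys confirmed multi-variant the moment a second distinct dtype appears, so no dtype sets are ever built and no filtering over them is needed.
import Mathlib
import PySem

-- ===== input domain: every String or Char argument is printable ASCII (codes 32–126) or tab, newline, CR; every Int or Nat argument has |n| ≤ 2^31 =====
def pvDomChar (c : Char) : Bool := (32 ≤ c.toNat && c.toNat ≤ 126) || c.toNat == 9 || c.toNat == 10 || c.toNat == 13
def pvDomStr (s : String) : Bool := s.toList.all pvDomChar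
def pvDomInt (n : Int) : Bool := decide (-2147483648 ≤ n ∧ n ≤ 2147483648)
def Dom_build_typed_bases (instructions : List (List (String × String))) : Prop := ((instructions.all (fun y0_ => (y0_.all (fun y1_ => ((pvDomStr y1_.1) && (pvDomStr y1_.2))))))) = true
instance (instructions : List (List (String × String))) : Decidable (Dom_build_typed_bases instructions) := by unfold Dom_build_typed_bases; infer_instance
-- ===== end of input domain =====

-- B replaces A's nested dict of per-(category,base) dtype SETS plus the post-loop
-- "len > 1" filter by one flat first-dtype dict and a set of keys already confirmed
-- multi-variant (objective: simpler).  A mutates nothing observable; equivalence is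
-- about the return value.

-- ===== PORT A =====
-- shared helpers (identical in A and B, as in the Python sources)
def TYPE_SUFFIXES : List String :=
  ["f16", "f32", "bf16", "i8", "i16", "i32", "i64", "u8", "u16", "u32", "u64"]

def extract_loop (name : String) : List String → String × Option String
  | [] => (name, none)
  | suffix :: rest =>
    if PySem.Str.endswith name (String.ofList ('_' :: suffix.toList)) then
      let base := PySem.Str.slice name none (some (-(PySem.Str.len suffix) - 1))
      if (["_and_", "_or_", "_xor_", "_not_"].any fun op => PySem.Str.isIn op base) then
        (name, none)
      else
        (base, some suffix)
    else extract_loop name rest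

def extract_base_and_type (name : String) : String × Option String :=
  extract_loop name TYPE_SUFFIXES

def instruction_category (name : String) : String :=
  if PySem.Str.startswith name "v_" then "v"
  else if PySem.Str.startswith name "s_" then "s"
  else if (PySem.Str.startswith name "ds_" || PySem.Str.startswith name "buffer_" ||
           PySem.Str.startswith name "flat_" || PySem.Str.startswith name "global_" ||
           PySem.Str.startswith name "image_") then "mem"
  else "misc"

-- inst["normalized_name"]; total via default, Pre_ requires the key to be present
def pyName (inst : List (String × String)) : String :=
  PySem.Dict.getD (PySem.Dict.ofList inst) "normalized_name" ""

-- loop body of A's first pass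
def buildA_body (bases : PySem.Dict String (PySem.Dict String (PySem.Set String)))
    (inst : List (String × String)) : PySem.Dict String (PySem.Dict String (PySem.Set String)) :=
  let name := pyName inst
  match extract_base_and_type name with
  | (_, none) => bases
  | (base, some dtype) =>
    let category := instruction_category name
    let bases := bases.setdefault category PySem.Dict.empty
    bases.modify category PySem.Dict.empty
      (fun m => m.modify base PySem.Set.empty (fun s => PySem.Set.add s dtype))

-- the set comprehension {base for base, dtypes in base_map.items() if len(dtypes) > 1}
def compA (m : PySem.Dict String (PySem.Set String)) : PySem.Set String :=
  m.items.foldl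
    (fun s q => if 1 < PySem.Set.len q.2 then PySem.Set.add s q.1 else s) PySem.Set.empty

def build_typed_bases (instructions : List (List (String × String))) : List (String × List String) :=
  let bases : PySem.Dict String (PySem.Dict String (PySem.Set String)) :=
    PySem.Dict.ofList
      [("v", PySem.Dict.empty), ("s", PySem.Dict.empty),
       ("mem", PySem.Dict.empty), ("misc", PySem.Dict.empty)]
  let bases := instructions.foldl buildA_body bases
  let typed := bases.items.foldl
    (fun typed p => typed.insert p.1 (compA p.2))
    (PySem.Dict.empty : PySem.Dict String (PySem.Set String))
  typed.items

-- ===== PORT B =====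
-- loop body of B's single pass: state = (first_seen, multi)
def buildB_body
    (st : PySem.Dict (String × String) String × PySem.Set (String × String))
    (inst : List (String × String)) :
    PySem.Dict (String × String) String × PySem.Set (String × String) :=
  let name := pyName inst
  match extract_base_and_type name with
  | (_, none) => st
  | (base, some dtype) =>
    let key := (instruction_category name, base)
    if ¬ (st.1.contains key) then (st.1.insert key dtype, st.2)
    else if dtype ≠ st.1.getD key "" then (st.1, PySem.Set.add st.2 key)
    else st

def build_typed_bases_alt (instructions : List (List (String × String))) :
    List (String × List String) :=
  let st := instructions.foldl buildB_body (PySem.Dict.empty, PySem.Set.empty)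
  let typed : PySem.Dict String (PySem.Set String) :=
    PySem.Dict.ofList
      [("v", PySem.Set.empty), ("s", PySem.Set.empty),
       ("mem", PySem.Set.empty), ("misc", PySem.Set.empty)]
  -- typed[category].add(base): category is always one of the four seeded keys,
  -- so Dict.modify (with an irrelevant default) is Python's typed[category].add
  let typed := st.1.items.foldl
    (fun typed kv =>
      if PySem.Set.contains st.2 kv.1 then
        typed.modify kv.1.1 PySem.Set.empty (fun s => PySem.Set.add s kv.1.2)
      else typed)
    typed
  typed.items

-- ===== PRECONDITION & SPEC =====
-- Pre_ excludes exactly the instruction dicts without a "normalized_name" key,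
-- on which the Python A (and B) raises KeyError.
def Pre_build_typed_bases (instructions : List (List (String × String))) : Prop :=
  ∀ inst ∈ instructions, (PySem.Dict.ofList inst).contains "normalized_name" = true
instance (instructions : List (List (String × String))) : Decidable (Pre_build_typed_bases instructions) := by
  unfold Pre_build_typed_bases; infer_instance

def pvWitness_build_typed_bases : (List (List (String × String))) :=
  [[("normalized_name", "v_add_f16")], [("normalized_name", "v_add_f32")]]

def Spec_build_typed_bases (instructions : List (List (String × String))) (out : List (String × List String)) : Prop := out = build_typed_bases_alt instructions
instance (instructions : List (List (String × String))) (out : List (String × List String)) : Decidable (Spec_build_typed_bases instructions out) := by unfold Spec_build_typed_bases; infer_instance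

-- ===== CLAIM (what is proved, stated in full; the proofs are below) =====
def Claim_equal_build_typed_bases : Prop := ∀ (instructions : List (List (String × String))), Dom_build_typed_bases instructions → Pre_build_typed_bases instructions → Spec_build_typed_bases instructions (build_typed_bases instructions)

-- ===== LEMMAS AND PROOFS =====

-- category is always one of the four seeded keys
lemma cat4 (name : String) :
    instruction_category name = "v" ∨ instruction_category name = "s" ∨
    instruction_category name = "mem" ∨ instruction_category name = "misc" := by
  unfold instruction_category; split_ifs <;> simp

-- the per-category projection of the flat first_seen key list
def catOf? (c : String) (kv : (String × String) × String) : Option String :=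
  if kv.1.1 = c then some kv.1.2 else none

-- bases selected by B's state for category c
def selC (multi : PySem.Set (String × String)) (c : String)
    (l : List ((String × String) × String)) : List String :=
  (l.filterMap (catOf? c)).filter (fun b => PySem.Set.contains multi (c, b))

-- coupling between one inner dict of A and B's flat state, for category c
def Pc (c : String) (m : PySem.Dict String (PySem.Set String))
    (fs : PySem.Dict (String × String) String)
    (multi : PySem.Set (String × String)) : Prop :=
  m.keys = fs.items.filterMap (catOf? c) ∧
  ∀ b S, (b, S) ∈ m.items →
    ∃ d0, fs.get? (c, b) = some d0 ∧
      (PySem.Set.contains multi (c, b) = true → 1 < S.length) ∧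
      (PySem.Set.contains multi (c, b) = false → S = [d0])

-- the loop invariant coupling A's nested state with B's flat state
def InvAB (bases : PySem.Dict String (PySem.Dict String (PySem.Set String)))
    (st : PySem.Dict (String × String) String × PySem.Set (String × String)) : Prop :=
  (∃ mv ms mm mh,
      bases = PySem.Dict.mk [("v", mv), ("s", ms), ("mem", mm), ("misc", mh)] ∧
      Pc "v" mv st.1 st.2 ∧ Pc "s" ms st.1 st.2 ∧
      Pc "mem" mm st.1 st.2 ∧ Pc "misc" mh st.1 st.2) ∧
  st.1.keys.Nodup ∧
  (∀ k, PySem.Set.contains st.2 k = true → st.1.contains k = true) ∧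
  (∀ kv ∈ st.1.items, kv.1.1 = "v" ∨ kv.1.1 = "s" ∨ kv.1.1 = "mem" ∨ kv.1.1 = "misc")

lemma mem_filterMapCat {l : List ((String × String) × String)} {c b : String} :
    b ∈ l.filterMap (catOf? c) ↔ ∃ v, ((c, b), v) ∈ l := by
  rw [List.mem_filterMap]
  constructor
  · rintro ⟨⟨⟨c', b'⟩, v⟩, hm, h⟩
    by_cases hc : c' = c
    · simp [catOf?, hc] at h
      subst hc; subst h
      exact ⟨v, hm⟩
    · simp [catOf?, hc] at h
  · rintro ⟨v, hv⟩
    exact ⟨((c, b), v), hv, by simp [catOf?]⟩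

lemma nodup_filterMapCat {l : List ((String × String) × String)} (c : String)
    (h : (l.map Prod.fst).Nodup) : (l.filterMap (catOf? c)).Nodup := by
  induction l with
  | nil => simp
  | cons kv t ih =>
    simp only [List.map_cons, List.nodup_cons] at h
    obtain ⟨h1, h2⟩ := h
    rw [List.filterMap_cons]
    by_cases hc : kv.1.1 = c
    · have : catOf? c kv = some kv.1.2 := by simp [catOf?, hc]
      rw [this]
      refine List.nodup_cons.mpr ⟨?_, ih h2⟩
      intro hmem
      rcases mem_filterMapCat.mp hmem with ⟨v, hv⟩
      exact h1 (by
        have : kv.1 = (c, kv.1.2) := by rw [← hc]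
        rw [this]
        exact List.mem_map.mpr ⟨((c, kv.1.2), v), hv, rfl⟩)
    · have : catOf? c kv = none := by simp [catOf?, hc]
      rw [this]
      exact ih h2

lemma dict_contains_iff_exists {κ ν : Type} [BEq κ] [LawfulBEq κ]
    {d : PySem.Dict κ ν} {k : κ} :
    d.contains k = true ↔ ∃ v, (k, v) ∈ d.items := by
  unfold PySem.Dict.contains
  rw [List.any_eq_true]
  constructor
  · rintro ⟨⟨k', v⟩, hm, he⟩
    simp only [beq_iff_eq] at he
    subst he
    exact ⟨v, hm⟩
  · rintro ⟨v, hv⟩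
    exact ⟨(k, v), hv, by simp⟩

lemma dict_get?_none {κ ν : Type} [BEq κ] [LawfulBEq κ]
    (d : PySem.Dict κ ν) (k : κ) (h : d.contains k = false) : d.get? k = none := by
  unfold PySem.Dict.get?
  unfold PySem.Dict.contains at h
  rw [List.any_eq_false] at h
  rw [List.find?_eq_none.mpr (by intro p hp; exact h p hp)]
  rfl

lemma mem_items_of_get? {κ ν : Type} [BEq κ] [LawfulBEq κ]
    {d : PySem.Dict κ ν} {k : κ} {v : ν} (h : d.get? k = some v) : (k, v) ∈ d.items := by
  unfold PySem.Dict.get? at h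
  cases hf : List.find? (fun p => p.1 == k) d.items with
  | none => rw [hf] at h; simp at h
  | some p =>
    rw [hf] at h
    simp only [Option.map_some, Option.some.injEq] at h
    have hm := List.mem_of_find?_eq_some hf
    have hp := List.find?_some hf
    simp only [beq_iff_eq] at hp
    have : p = (k, v) := by
      rcases p with ⟨p1, p2⟩
      simp only at hp h
      rw [hp, h]
    rw [← this]
    exact hm

lemma length_add_ge {α : Type} [BEq α] (s : PySem.Set α) (x : α) :
    s.length ≤ (PySem.Set.add s x).length := by
  unfold PySem.Set.add
  split
  · exact le_refl _
  · simp

-- Pc preservation: the touched category, key not seen before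
lemma Pc_step_new (c b dt : String) (m : PySem.Dict String (PySem.Set String))
    (fs : PySem.Dict (String × String) String) (multi : PySem.Set (String × String))
    (hP : Pc c m fs multi)
    (hnot : fs.contains (c, b) = false)
    (hmsub : ∀ k, PySem.Set.contains multi k = true → fs.contains k = true) :
    Pc c (m.modify b PySem.Set.empty (fun s => PySem.Set.add s dt))
      (fs.insert (c, b) dt) multi := by
  obtain ⟨hkeys, hitems⟩ := hP
  have hbnot : b ∉ m.keys := by
    rw [hkeys]
    intro hmem
    rcases mem_filterMapCat.mp hmem with ⟨v, hv⟩
    have : fs.contains (c, b) = true := dict_contains_iff_exists.mpr ⟨v, hv⟩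
    rw [hnot] at this; cases this
  have hmc : m.contains b = false := by
    cases hx : m.contains b
    · rfl
    · exact absurd ((PySem.Dict.contains_iff_mem_keys m b).mp hx) hbnot
  have hget0 : m.get? b = none := dict_get?_none m b hmc
  have hmod : m.modify b PySem.Set.empty (fun s => PySem.Set.add s dt)
      = m.insert b [dt] := by
    unfold PySem.Dict.modify PySem.Dict.getD
    rw [hget0]
    simp [PySem.Set.add, PySem.Set.empty]
  rw [hmod]
  have hitems' := PySem.Dict.items_insert_of_not_contains m ([dt] : PySem.Set String) hmc
  have hkeys' := PySem.Dict.keys_insert_of_not_contains m ([dt] : PySem.Set String) hmc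
  have hfsitems := PySem.Dict.items_insert_of_not_contains fs dt hnot
  constructor
  · rw [hkeys', hfsitems, List.filterMap_append, hkeys]
    congr 1
    simp [catOf?]
  · intro b' S' hmem
    rw [hitems'] at hmem
    rcases List.mem_append.mp hmem with hold | hnew
    · rcases hitems b' S' hold with ⟨d0, hg, h1, h2⟩
      have hb' : b' ≠ b := by
        intro he; subst he
        exact hbnot (PySem.Dict.mem_keys_of_mem_items m hold)
      refine ⟨d0, ?_, h1, h2⟩
      rw [PySem.Dict.get?_insert_of_ne fs dt (by simp [hb'])]
      exact hg
    · simp only [List.mem_singleton, Prod.mk.injEq] at hnew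
      obtain ⟨hb', hS'⟩ := hnew
      subst hb'; subst hS'
      have hmf : PySem.Set.contains multi (c, b') = false := by
        cases hx : PySem.Set.contains multi (c, b')
        · rfl
        · have := hmsub _ hx; rw [hnot] at this; cases this
      exact ⟨dt, PySem.Dict.get?_insert_self fs _ dt,
        (by intro hx; rw [hmf] at hx; cases hx), fun _ => rfl⟩

-- Pc preservation: an untouched category, key not seen before
lemma Pc_other_new (c c' b dt : String) (m : PySem.Dict String (PySem.Set String))
    (fs : PySem.Dict (String × String) String) (multi : PySem.Set (String × String))
    (hne : c' ≠ c) (hP : Pc c' m fs multi)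
    (hnot : fs.contains (c, b) = false) :
    Pc c' m (fs.insert (c, b) dt) multi := by
  obtain ⟨hkeys, hitems⟩ := hP
  have hcc : c ≠ c' := Ne.symm hne
  constructor
  · rw [PySem.Dict.items_insert_of_not_contains fs dt hnot, List.filterMap_append, hkeys]
    have : catOf? c' ((c, b), dt) = none := by simp [catOf?, hcc]
    simp [this]
  · intro b' S' hm'
    rcases hitems b' S' hm' with ⟨d0, hg, h1, h2⟩
    refine ⟨d0, ?_, h1, h2⟩
    rw [PySem.Dict.get?_insert_of_ne fs dt ?_]
    · exact hg
    · intro he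
      exact hne (congrArg Prod.fst he)

-- Pc preservation: the touched category, repeat key with a different dtype
lemma Pc_step_diff (c b dt d0 : String) (m : PySem.Dict String (PySem.Set String))
    (fs : PySem.Dict (String × String) String) (multi : PySem.Set (String × String))
    (hP : Pc c m fs multi) (hnd : fs.keys.Nodup)
    (hget : fs.get? (c, b) = some d0) (hdt : dt ≠ d0) :
    Pc c (m.modify b PySem.Set.empty (fun s => PySem.Set.add s dt))
      fs (PySem.Set.add multi (c, b)) := by
  obtain ⟨hkeys, hitems⟩ := hP
  have hndm : m.keys.Nodup := by
    rw [hkeys]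
    exact nodup_filterMapCat c (by simpa [PySem.Dict.keys] using hnd)
  have hmemfs : ((c, b), d0) ∈ fs.items := mem_items_of_get? hget
  have hbk : b ∈ m.keys := by
    rw [hkeys]; exact mem_filterMapCat.mpr ⟨d0, hmemfs⟩
  have hpair : ∃ S0, (b, S0) ∈ m.items := by
    unfold PySem.Dict.keys at hbk
    rcases List.mem_map.mp hbk with ⟨p, hp, hfst⟩
    exact ⟨p.2, by rw [← hfst]; exact hp⟩
  rcases hpair with ⟨S0, hpair⟩
  have hgetm : m.get? b = some S0 := PySem.Dict.get?_of_mem_items m hpair hndm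
  have hcont : m.contains b = true := by
    rw [PySem.Dict.contains_iff_mem_keys]; exact hbk
  have hmod : m.modify b PySem.Set.empty (fun s => PySem.Set.add s dt)
      = m.insert b (PySem.Set.add S0 dt) := by
    unfold PySem.Dict.modify PySem.Dict.getD
    rw [hgetm]
    rfl
  rw [hmod]
  have hitems' := PySem.Dict.items_insert_of_contains m (PySem.Set.add S0 dt) hcont
  have hkeys' := PySem.Dict.keys_insert_of_contains m (PySem.Set.add S0 dt) hcont
  rcases hitems b S0 hpair with ⟨d0', hg', h1', h2'⟩
  have hd0 : d0' = d0 := by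
    rw [hget] at hg'
    exact ((Option.some.injEq _ _).mp hg').symm
  subst hd0
  constructor
  · rw [hkeys']; exact hkeys
  · intro b' S' hm'
    rw [hitems'] at hm'
    rcases List.mem_map.mp hm' with ⟨p, hp, hpe⟩
    by_cases hpb : p.1 = b
    · have hrepl : (b, PySem.Set.add S0 dt) = (b', S') := by
        rw [← hpe]; simp [hpb]
      obtain ⟨hb', hS'⟩ := Prod.mk.injEq _ _ _ _ ▸ hrepl
      subst hb'; subst hS'
      refine ⟨d0', hget, ?_, ?_⟩
      · intro _
        by_cases hmb : PySem.Set.contains multi (c, b) = true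
        · calc 1 < S0.length := h1' hmb
            _ ≤ _ := length_add_ge S0 dt
        · have hS0 : S0 = [d0'] := h2' (by simpa using hmb)
          rw [hS0]
          have hadd : PySem.Set.add [d0'] dt = [d0', dt] := by
            have : dt ∉ ([d0'] : List String) := by simp [hdt]
            simpa using PySem.Set.add_of_not_mem this
          rw [hadd]
          simp
      · intro hfalse
        exfalso
        have : PySem.Set.contains (PySem.Set.add multi (c, b)) (c, b) = true := by
          rw [PySem.Set.contains_iff]
          exact (PySem.Set.mem_add _ _ _).mpr (Or.inr rfl)
        rw [hfalse] at this; cases this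
    · have hpe' : p = (b', S') := by
        rw [← hpe]; simp [hpb]
      rw [hpe'] at hp hpb
      have hbb : b' ≠ b := by simpa using hpb
      rcases hitems b' S' hp with ⟨e0, he', k1', k2'⟩
      refine ⟨e0, he', ?_, ?_⟩
      · intro htrue
        apply k1'
        rw [PySem.Set.contains_iff] at htrue ⊢
        rcases (PySem.Set.mem_add _ _ _).mp htrue with hmem | heq
        · exact hmem
        · exact absurd (congrArg Prod.snd heq) hbb
      · intro hfalse
        apply k2'
        cases hx : PySem.Set.contains multi (c, b')
        · rfl
        · exfalso
          have : PySem.Set.contains (PySem.Set.add multi (c, b)) (c, b') = true := by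
            rw [PySem.Set.contains_iff]
            exact (PySem.Set.mem_add _ _ _).mpr (Or.inl ((PySem.Set.contains_iff _ _).mp hx))
          rw [hfalse] at this; cases this

-- Pc preservation: an untouched category, repeat key with a different dtype
lemma Pc_other_diff (c c' b : String) (m : PySem.Dict String (PySem.Set String))
    (fs : PySem.Dict (String × String) String) (multi : PySem.Set (String × String))
    (hne : c' ≠ c) (hP : Pc c' m fs multi) :
    Pc c' m fs (PySem.Set.add multi (c, b)) := by
  obtain ⟨hkeys, hitems⟩ := hP
  refine ⟨hkeys, ?_⟩
  intro b' S' hm'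
  rcases hitems b' S' hm' with ⟨d0, hg, h1, h2⟩
  refine ⟨d0, hg, ?_, ?_⟩
  · intro htrue
    apply h1
    rw [PySem.Set.contains_iff] at htrue ⊢
    rcases (PySem.Set.mem_add _ _ _).mp htrue with hmem | heq
    · exact hmem
    · exact absurd (congrArg Prod.fst heq) hne
  · intro hfalse
    apply h2
    cases hx : PySem.Set.contains multi (c', b')
    · rfl
    · exfalso
      have : PySem.Set.contains (PySem.Set.add multi (c, b)) (c', b') = true := by
        rw [PySem.Set.contains_iff]
        exact (PySem.Set.mem_add _ _ _).mpr (Or.inl ((PySem.Set.contains_iff _ _).mp hx))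
      rw [hfalse] at this; cases this

-- Pc preservation: the touched category, repeat key with the same dtype (B does nothing)
lemma Pc_step_same (c b d0 : String) (m : PySem.Dict String (PySem.Set String))
    (fs : PySem.Dict (String × String) String) (multi : PySem.Set (String × String))
    (hP : Pc c m fs multi) (hnd : fs.keys.Nodup)
    (hget : fs.get? (c, b) = some d0) :
    Pc c (m.modify b PySem.Set.empty (fun s => PySem.Set.add s d0)) fs multi := by
  obtain ⟨hkeys, hitems⟩ := hP
  have hndm : m.keys.Nodup := by
    rw [hkeys]
    exact nodup_filterMapCat c (by simpa [PySem.Dict.keys] using hnd)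
  have hmemfs : ((c, b), d0) ∈ fs.items := mem_items_of_get? hget
  have hbk : b ∈ m.keys := by
    rw [hkeys]; exact mem_filterMapCat.mpr ⟨d0, hmemfs⟩
  have hpair : ∃ S0, (b, S0) ∈ m.items := by
    unfold PySem.Dict.keys at hbk
    rcases List.mem_map.mp hbk with ⟨p, hp, hfst⟩
    exact ⟨p.2, by rw [← hfst]; exact hp⟩
  rcases hpair with ⟨S0, hpair⟩
  have hgetm : m.get? b = some S0 := PySem.Dict.get?_of_mem_items m hpair hndm
  have hcont : m.contains b = true := by
    rw [PySem.Dict.contains_iff_mem_keys]; exact hbk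
  have hmod : m.modify b PySem.Set.empty (fun s => PySem.Set.add s d0)
      = m.insert b (PySem.Set.add S0 d0) := by
    unfold PySem.Dict.modify PySem.Dict.getD
    rw [hgetm]
    rfl
  rw [hmod]
  have hitems' := PySem.Dict.items_insert_of_contains m (PySem.Set.add S0 d0) hcont
  have hkeys' := PySem.Dict.keys_insert_of_contains m (PySem.Set.add S0 d0) hcont
  rcases hitems b S0 hpair with ⟨d0', hg', h1', h2'⟩
  have hd0 : d0' = d0 := by
    rw [hget] at hg'
    exact ((Option.some.injEq _ _).mp hg').symm
  subst hd0
  constructor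
  · rw [hkeys']; exact hkeys
  · intro b' S' hm'
    rw [hitems'] at hm'
    rcases List.mem_map.mp hm' with ⟨p, hp, hpe⟩
    by_cases hpb : p.1 = b
    · have hrepl : (b, PySem.Set.add S0 d0') = (b', S') := by
        rw [← hpe]; simp [hpb]
      obtain ⟨hb', hS'⟩ := Prod.mk.injEq _ _ _ _ ▸ hrepl
      subst hb'; subst hS'
      refine ⟨d0', hget, ?_, ?_⟩
      · intro htrue
        calc 1 < S0.length := h1' htrue
          _ ≤ _ := length_add_ge S0 d0'
      · intro hfalse
        rw [h2' hfalse]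
        exact PySem.Set.add_of_mem (by simp)
    · have hpe' : p = (b', S') := by
        rw [← hpe]; simp [hpb]
      rw [hpe'] at hp
      exact hitems b' S' hp

-- Dict.modify on the literal four-key dict, one lemma per slot
lemma modify4_v {ν : Type} (x1 x2 x3 x4 dflt : ν) (f : ν → ν) :
    (PySem.Dict.mk [("v", x1), ("s", x2), ("mem", x3), ("misc", x4)]).modify "v" dflt f
      = PySem.Dict.mk [("v", f x1), ("s", x2), ("mem", x3), ("misc", x4)] := by
  simp [PySem.Dict.modify, PySem.Dict.insert, PySem.Dict.contains,
        PySem.Dict.getD, PySem.Dict.get?, List.find?]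

lemma modify4_s {ν : Type} (x1 x2 x3 x4 dflt : ν) (f : ν → ν) :
    (PySem.Dict.mk [("v", x1), ("s", x2), ("mem", x3), ("misc", x4)]).modify "s" dflt f
      = PySem.Dict.mk [("v", x1), ("s", f x2), ("mem", x3), ("misc", x4)] := by
  simp [PySem.Dict.modify, PySem.Dict.insert, PySem.Dict.contains,
        PySem.Dict.getD, PySem.Dict.get?, List.find?]

lemma modify4_mem {ν : Type} (x1 x2 x3 x4 dflt : ν) (f : ν → ν) :
    (PySem.Dict.mk [("v", x1), ("s", x2), ("mem", x3), ("misc", x4)]).modify "mem" dflt f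
      = PySem.Dict.mk [("v", x1), ("s", x2), ("mem", f x3), ("misc", x4)] := by
  simp [PySem.Dict.modify, PySem.Dict.insert, PySem.Dict.contains,
        PySem.Dict.getD, PySem.Dict.get?, List.find?]

lemma modify4_misc {ν : Type} (x1 x2 x3 x4 dflt : ν) (f : ν → ν) :
    (PySem.Dict.mk [("v", x1), ("s", x2), ("mem", x3), ("misc", x4)]).modify "misc" dflt f
      = PySem.Dict.mk [("v", x1), ("s", x2), ("mem", x3), ("misc", f x4)] := by
  simp [PySem.Dict.modify, PySem.Dict.insert, PySem.Dict.contains,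
        PySem.Dict.getD, PySem.Dict.get?, List.find?]

lemma setdefault4 {ν : Type} (x1 x2 x3 x4 dflt : ν) (c : String)
    (hc : c = "v" ∨ c = "s" ∨ c = "mem" ∨ c = "misc") :
    (PySem.Dict.mk [("v", x1), ("s", x2), ("mem", x3), ("misc", x4)]).setdefault c dflt
      = PySem.Dict.mk [("v", x1), ("s", x2), ("mem", x3), ("misc", x4)] := by
  rcases hc with h | h | h | h <;> subst h <;>
    simp [PySem.Dict.setdefault, PySem.Dict.contains]

-- one step of both loops preserves the invariant
lemma step_Inv (bases : PySem.Dict String (PySem.Dict String (PySem.Set String)))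
    (st : PySem.Dict (String × String) String × PySem.Set (String × String))
    (inst : List (String × String)) (h : InvAB bases st) :
    InvAB (buildA_body bases inst) (buildB_body st inst) := by
  obtain ⟨⟨mv, ms, mm, mh, hbEq, hv, hs, hm, hmi⟩, hnd, hsub, hcats⟩ := h
  subst hbEq
  rcases hx : extract_base_and_type (pyName inst) with ⟨bb, odt⟩
  cases odt with
  | none =>
    simp only [buildA_body, buildB_body, hx]
    exact ⟨⟨mv, ms, mm, mh, rfl, hv, hs, hm, hmi⟩, hnd, hsub, hcats⟩
  | some dt =>
    simp only [buildA_body, buildB_body, hx]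
    rcases cat4 (pyName inst) with hcat | hcat | hcat | hcat
    · rw [hcat]
      rw [setdefault4 mv ms mm mh PySem.Dict.empty "v" (Or.inl rfl), modify4_v]
      by_cases hk : st.1.contains (("v", bb)) = true
      · rw [if_neg (by simp [hk])]
        rcases dict_contains_iff_exists.mp hk with ⟨v0, hv0⟩
        have hget : st.1.get? (("v", bb)) = some v0 := PySem.Dict.get?_of_mem_items st.1 hv0 hnd
        have hgetD : st.1.getD (("v", bb)) "" = v0 := by
          unfold PySem.Dict.getD; rw [hget]; rfl
        rw [hgetD]
        by_cases hdt : dt = v0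
        · rw [if_neg (by simp [hdt]), hdt]
          exact ⟨⟨_, _, _, _, rfl, Pc_step_same "v" bb v0 mv st.1 st.2 hv hnd hget,
              hs,
              hm,
              hmi⟩, hnd, hsub, hcats⟩
        · rw [if_pos hdt]
          refine ⟨⟨_, _, _, _, rfl, Pc_step_diff "v" bb dt v0 mv st.1 st.2 hv hnd hget hdt,
              Pc_other_diff "v" "s" bb ms st.1 st.2 (by decide) hs,
              Pc_other_diff "v" "mem" bb mm st.1 st.2 (by decide) hm,
              Pc_other_diff "v" "misc" bb mh st.1 st.2 (by decide) hmi⟩, hnd, ?_, hcats⟩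
          intro k hkm
          rw [PySem.Set.contains_iff] at hkm
          rcases (PySem.Set.mem_add _ _ _).mp hkm with hmem | heq
          · exact hsub k ((PySem.Set.contains_iff _ _).mpr hmem)
          · rw [heq]; exact hk
      · rw [if_pos (by simp [hk])]
        have hnot : st.1.contains (("v", bb)) = false := by simpa using hk
        refine ⟨⟨_, _, _, _, rfl, Pc_step_new "v" bb dt mv st.1 st.2 hv hnot hsub,
            Pc_other_new "v" "s" bb dt ms st.1 st.2 (by decide) hs hnot,
            Pc_other_new "v" "mem" bb dt mm st.1 st.2 (by decide) hm hnot,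
            Pc_other_new "v" "misc" bb dt mh st.1 st.2 (by decide) hmi hnot⟩,
          PySem.Dict.nodup_keys_insert st.1 _ _ hnd, ?_, ?_⟩
        · intro k hkm
          rw [PySem.Dict.contains_insert, hsub k hkm]
          simp
        · intro kv hkv
          rw [PySem.Dict.items_insert_of_not_contains st.1 dt hnot] at hkv
          rcases List.mem_append.mp hkv with hold | hnew
          · exact hcats kv hold
          · simp only [List.mem_singleton] at hnew
            subst hnew
            exact Or.inl rfl
    · rw [hcat]
      rw [setdefault4 mv ms mm mh PySem.Dict.empty "s" (Or.inr (Or.inl rfl)), modify4_s]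
      by_cases hk : st.1.contains (("s", bb)) = true
      · rw [if_neg (by simp [hk])]
        rcases dict_contains_iff_exists.mp hk with ⟨v0, hv0⟩
        have hget : st.1.get? (("s", bb)) = some v0 := PySem.Dict.get?_of_mem_items st.1 hv0 hnd
        have hgetD : st.1.getD (("s", bb)) "" = v0 := by
          unfold PySem.Dict.getD; rw [hget]; rfl
        rw [hgetD]
        by_cases hdt : dt = v0
        · rw [if_neg (by simp [hdt]), hdt]
          exact ⟨⟨_, _, _, _, rfl, hv,
              Pc_step_same "s" bb v0 ms st.1 st.2 hs hnd hget,
              hm,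
              hmi⟩, hnd, hsub, hcats⟩
        · rw [if_pos hdt]
          refine ⟨⟨_, _, _, _, rfl, Pc_other_diff "s" "v" bb mv st.1 st.2 (by decide) hv,
              Pc_step_diff "s" bb dt v0 ms st.1 st.2 hs hnd hget hdt,
              Pc_other_diff "s" "mem" bb mm st.1 st.2 (by decide) hm,
              Pc_other_diff "s" "misc" bb mh st.1 st.2 (by decide) hmi⟩, hnd, ?_, hcats⟩
          intro k hkm
          rw [PySem.Set.contains_iff] at hkm
          rcases (PySem.Set.mem_add _ _ _).mp hkm with hmem | heq
          · exact hsub k ((PySem.Set.contains_iff _ _).mpr hmem)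
          · rw [heq]; exact hk
      · rw [if_pos (by simp [hk])]
        have hnot : st.1.contains (("s", bb)) = false := by simpa using hk
        refine ⟨⟨_, _, _, _, rfl, Pc_other_new "s" "v" bb dt mv st.1 st.2 (by decide) hv hnot,
            Pc_step_new "s" bb dt ms st.1 st.2 hs hnot hsub,
            Pc_other_new "s" "mem" bb dt mm st.1 st.2 (by decide) hm hnot,
            Pc_other_new "s" "misc" bb dt mh st.1 st.2 (by decide) hmi hnot⟩,
          PySem.Dict.nodup_keys_insert st.1 _ _ hnd, ?_, ?_⟩
        · intro k hkm
          rw [PySem.Dict.contains_insert, hsub k hkm]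
          simp
        · intro kv hkv
          rw [PySem.Dict.items_insert_of_not_contains st.1 dt hnot] at hkv
          rcases List.mem_append.mp hkv with hold | hnew
          · exact hcats kv hold
          · simp only [List.mem_singleton] at hnew
            subst hnew
            exact Or.inr (Or.inl rfl)
    · rw [hcat]
      rw [setdefault4 mv ms mm mh PySem.Dict.empty "mem" (Or.inr (Or.inr (Or.inl rfl))), modify4_mem]
      by_cases hk : st.1.contains (("mem", bb)) = true
      · rw [if_neg (by simp [hk])]
        rcases dict_contains_iff_exists.mp hk with ⟨v0, hv0⟩
        have hget : st.1.get? (("mem", bb)) = some v0 := PySem.Dict.get?_of_mem_items st.1 hv0 hnd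
        have hgetD : st.1.getD (("mem", bb)) "" = v0 := by
          unfold PySem.Dict.getD; rw [hget]; rfl
        rw [hgetD]
        by_cases hdt : dt = v0
        · rw [if_neg (by simp [hdt]), hdt]
          exact ⟨⟨_, _, _, _, rfl, hv,
              hs,
              Pc_step_same "mem" bb v0 mm st.1 st.2 hm hnd hget,
              hmi⟩, hnd, hsub, hcats⟩
        · rw [if_pos hdt]
          refine ⟨⟨_, _, _, _, rfl, Pc_other_diff "mem" "v" bb mv st.1 st.2 (by decide) hv,
              Pc_other_diff "mem" "s" bb ms st.1 st.2 (by decide) hs,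
              Pc_step_diff "mem" bb dt v0 mm st.1 st.2 hm hnd hget hdt,
              Pc_other_diff "mem" "misc" bb mh st.1 st.2 (by decide) hmi⟩, hnd, ?_, hcats⟩
          intro k hkm
          rw [PySem.Set.contains_iff] at hkm
          rcases (PySem.Set.mem_add _ _ _).mp hkm with hmem | heq
          · exact hsub k ((PySem.Set.contains_iff _ _).mpr hmem)
          · rw [heq]; exact hk
      · rw [if_pos (by simp [hk])]
        have hnot : st.1.contains (("mem", bb)) = false := by simpa using hk
        refine ⟨⟨_, _, _, _, rfl, Pc_other_new "mem" "v" bb dt mv st.1 st.2 (by decide) hv hnot,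
            Pc_other_new "mem" "s" bb dt ms st.1 st.2 (by decide) hs hnot,
            Pc_step_new "mem" bb dt mm st.1 st.2 hm hnot hsub,
            Pc_other_new "mem" "misc" bb dt mh st.1 st.2 (by decide) hmi hnot⟩,
          PySem.Dict.nodup_keys_insert st.1 _ _ hnd, ?_, ?_⟩
        · intro k hkm
          rw [PySem.Dict.contains_insert, hsub k hkm]
          simp
        · intro kv hkv
          rw [PySem.Dict.items_insert_of_not_contains st.1 dt hnot] at hkv
          rcases List.mem_append.mp hkv with hold | hnew
          · exact hcats kv hold
          · simp only [List.mem_singleton] at hnew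
            subst hnew
            exact Or.inr (Or.inr (Or.inl rfl))
    · rw [hcat]
      rw [setdefault4 mv ms mm mh PySem.Dict.empty "misc" (Or.inr (Or.inr (Or.inr rfl))), modify4_misc]
      by_cases hk : st.1.contains (("misc", bb)) = true
      · rw [if_neg (by simp [hk])]
        rcases dict_contains_iff_exists.mp hk with ⟨v0, hv0⟩
        have hget : st.1.get? (("misc", bb)) = some v0 := PySem.Dict.get?_of_mem_items st.1 hv0 hnd
        have hgetD : st.1.getD (("misc", bb)) "" = v0 := by
          unfold PySem.Dict.getD; rw [hget]; rfl
        rw [hgetD]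
        by_cases hdt : dt = v0
        · rw [if_neg (by simp [hdt]), hdt]
          exact ⟨⟨_, _, _, _, rfl, hv,
              hs,
              hm,
              Pc_step_same "misc" bb v0 mh st.1 st.2 hmi hnd hget⟩, hnd, hsub, hcats⟩
        · rw [if_pos hdt]
          refine ⟨⟨_, _, _, _, rfl, Pc_other_diff "misc" "v" bb mv st.1 st.2 (by decide) hv,
              Pc_other_diff "misc" "s" bb ms st.1 st.2 (by decide) hs,
              Pc_other_diff "misc" "mem" bb mm st.1 st.2 (by decide) hm,
              Pc_step_diff "misc" bb dt v0 mh st.1 st.2 hmi hnd hget hdt⟩, hnd, ?_, hcats⟩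
          intro k hkm
          rw [PySem.Set.contains_iff] at hkm
          rcases (PySem.Set.mem_add _ _ _).mp hkm with hmem | heq
          · exact hsub k ((PySem.Set.contains_iff _ _).mpr hmem)
          · rw [heq]; exact hk
      · rw [if_pos (by simp [hk])]
        have hnot : st.1.contains (("misc", bb)) = false := by simpa using hk
        refine ⟨⟨_, _, _, _, rfl, Pc_other_new "misc" "v" bb dt mv st.1 st.2 (by decide) hv hnot,
            Pc_other_new "misc" "s" bb dt ms st.1 st.2 (by decide) hs hnot,
            Pc_other_new "misc" "mem" bb dt mm st.1 st.2 (by decide) hm hnot,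
            Pc_step_new "misc" bb dt mh st.1 st.2 hmi hnot hsub⟩,
          PySem.Dict.nodup_keys_insert st.1 _ _ hnd, ?_, ?_⟩
        · intro k hkm
          rw [PySem.Dict.contains_insert, hsub k hkm]
          simp
        · intro kv hkv
          rw [PySem.Dict.items_insert_of_not_contains st.1 dt hnot] at hkv
          rcases List.mem_append.mp hkv with hold | hnew
          · exact hcats kv hold
          · simp only [List.mem_singleton] at hnew
            subst hnew
            exact Or.inr (Or.inr (Or.inr rfl))

lemma fold_Inv (l : List (List (String × String)))
    (bases : PySem.Dict String (PySem.Dict String (PySem.Set String)))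
    (st : PySem.Dict (String × String) String × PySem.Set (String × String))
    (h : InvAB bases st) : InvAB (l.foldl buildA_body bases) (l.foldl buildB_body st) := by
  induction l generalizing bases st with
  | nil => exact h
  | cons i t ih => exact ih _ _ (step_Inv _ _ _ h)

-- generic fold of guarded Set.add over pairs with distinct fresh firsts
lemma foldl_add_eq (p : String × PySem.Set String → Bool) :
    ∀ (l : List (String × PySem.Set String)) (acc : PySem.Set String),
    (l.map Prod.fst).Nodup → (∀ q ∈ l, q.1 ∉ acc) →
    l.foldl (fun s q => if p q = true then PySem.Set.add s q.1 else s) acc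
      = acc ++ (l.filter p).map Prod.fst := by
  intro l
  induction l with
  | nil => intro acc _ _; simp
  | cons q t ih =>
    intro acc hn hf
    simp only [List.map_cons, List.nodup_cons] at hn
    obtain ⟨h1, h2⟩ := hn
    by_cases hp : p q = true
    · have hq1 : q.1 ∉ acc := hf q List.mem_cons_self
      have hfresh : ∀ q' ∈ t, q'.1 ∉ acc ++ [q.1] := by
        intro q' hq' hmem
        rcases List.mem_append.mp hmem with hin | hin
        · exact hf q' (List.mem_cons_of_mem _ hq') hin
        · simp only [List.mem_singleton] at hin
          exact h1 (hin ▸ List.mem_map.mpr ⟨q', hq', rfl⟩)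
      rw [List.foldl_cons, if_pos hp, PySem.Set.add_of_not_mem hq1,
        ih (acc ++ [q.1]) h2 hfresh, List.filter_cons, if_pos hp]
      simp
    · rw [List.foldl_cons, if_neg hp,
        ih acc h2 (fun q' h => hf q' (List.mem_cons_of_mem _ h)),
        List.filter_cons, if_neg hp]

-- A's set comprehension computes exactly B's selection for that category
lemma compA_eq (c : String) (m : PySem.Dict String (PySem.Set String))
    (fs : PySem.Dict (String × String) String) (multi : PySem.Set (String × String))
    (hP : Pc c m fs multi) (hnd : fs.keys.Nodup) :
    compA m = selC multi c fs.items := by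
  unfold compA selC
  obtain ⟨hkeys, hitems⟩ := hP
  have hndm : (m.items.map Prod.fst).Nodup := by
    have h0 : m.keys.Nodup := by
      rw [hkeys]
      exact nodup_filterMapCat c (by simpa [PySem.Dict.keys] using hnd)
    simpa [PySem.Dict.keys] using h0
  have hcong : m.items.foldl
        (fun s q => if 1 < PySem.Set.len q.2 then PySem.Set.add s q.1 else s) PySem.Set.empty
      = m.items.foldl
        (fun s q => if PySem.Set.contains multi (c, q.1) = true then PySem.Set.add s q.1 else s)
        PySem.Set.empty := by
    apply PySem.List.foldl_congr_mem
    intro acc q hq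
    have hq' : (q.1, q.2) ∈ m.items := hq
    rcases hitems q.1 q.2 hq' with ⟨d0, _hg, h1, h2⟩
    by_cases hc2 : PySem.Set.contains multi (c, q.1) = true
    · rw [if_pos hc2, if_pos ?_]
      have := h1 hc2
      rw [PySem.Set.len_eq]
      exact_mod_cast this
    · rw [if_neg hc2, if_neg ?_]
      have hS : q.2 = [d0] := h2 (by simpa using hc2)
      rw [PySem.Set.len_eq, hS]
      simp
  rw [hcong,
    foldl_add_eq (fun q => PySem.Set.contains multi (c, q.1)) m.items PySem.Set.empty hndm
      (by intro q _; simp [PySem.Set.empty])]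
  rw [← hkeys]
  simp only [PySem.Dict.keys, List.filter_map, PySem.Set.empty, List.nil_append]
  rfl

lemma selC_cons_same (multi : PySem.Set (String × String)) (c : String)
    (kv : (String × String) × String) (t : List ((String × String) × String))
    (hc : kv.1.1 = c) :
    selC multi c (kv :: t)
      = if PySem.Set.contains multi ((c, kv.1.2)) = true
        then kv.1.2 :: selC multi c t else selC multi c t := by
  unfold selC
  rw [List.filterMap_cons]
  have h1 : catOf? c kv = some kv.1.2 := by simp [catOf?, hc]
  rw [h1, List.filter_cons]

lemma selC_cons_other (multi : PySem.Set (String × String)) (c : String)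
    (kv : (String × String) × String) (t : List ((String × String) × String))
    (hc : kv.1.1 ≠ c) :
    selC multi c (kv :: t) = selC multi c t := by
  unfold selC
  rw [List.filterMap_cons]
  have h1 : catOf? c kv = none := by simp [catOf?, hc]
  rw [h1]

-- B's second pass over first_seen, on the literal four-key dict
lemma passB_items (multi : PySem.Set (String × String)) :
    ∀ (l : List ((String × String) × String)) (av asl am ah : List String),
    (l.map Prod.fst).Nodup →
    (∀ kv ∈ l, kv.1.1 = "v" ∨ kv.1.1 = "s" ∨ kv.1.1 = "mem" ∨ kv.1.1 = "misc") →
    (∀ kv ∈ l, kv.1.1 = "v" → kv.1.2 ∉ av) →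
    (∀ kv ∈ l, kv.1.1 = "s" → kv.1.2 ∉ asl) →
    (∀ kv ∈ l, kv.1.1 = "mem" → kv.1.2 ∉ am) →
    (∀ kv ∈ l, kv.1.1 = "misc" → kv.1.2 ∉ ah) →
    l.foldl
      (fun typed kv =>
        if PySem.Set.contains multi kv.1 then
          typed.modify kv.1.1 PySem.Set.empty (fun s => PySem.Set.add s kv.1.2)
        else typed)
      (PySem.Dict.mk [("v", av), ("s", asl), ("mem", am), ("misc", ah)])
    = PySem.Dict.mk
        [("v", av ++ selC multi "v" l), ("s", asl ++ selC multi "s" l),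
         ("mem", am ++ selC multi "mem" l), ("misc", ah ++ selC multi "misc" l)] := by
  intro l
  induction l with
  | nil =>
    intro av asl am ah _ _ _ _ _ _
    simp [selC]
  | cons kv t ih =>
    intro av asl am ah hn hcat hfv hfs hfm hfh
    simp only [List.map_cons, List.nodup_cons] at hn
    obtain ⟨h1, h2⟩ := hn
    rw [List.foldl_cons]
    have hkv1 : kv.1 = (kv.1.1, kv.1.2) := rfl
    rcases hcat kv List.mem_cons_self with hc | hc | hc | hc
    · by_cases hmb : PySem.Set.contains multi (("v", kv.1.2)) = true
      · have hfresh : ∀ kv' ∈ t, kv'.1.1 = "v" → kv'.1.2 ∉ av ++ [kv.1.2] := by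
          intro kv' hkv' hc' hmem
          rcases List.mem_append.mp hmem with hin | hin
          · exact hfv kv' (List.mem_cons_of_mem _ hkv') hc' hin
          · simp only [List.mem_singleton] at hin
            apply h1
            have he1 : kv'.1 = kv.1 := Prod.ext (by rw [hc', hc]) hin
            exact he1 ▸ List.mem_map.mpr ⟨kv', hkv', rfl⟩
        rw [if_pos (show PySem.Set.contains multi kv.1 = true by rw [hkv1, hc]; exact hmb)]
        rw [hc, modify4_v]
        rw [PySem.Set.add_of_not_mem (hfv kv List.mem_cons_self hc)]
        rw [ih (av ++ [kv.1.2]) asl am ah h2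
              (fun kv' h => hcat kv' (List.mem_cons_of_mem _ h))
              hfresh
              (fun kv' h hcc => hfs kv' (List.mem_cons_of_mem _ h) hcc)
              (fun kv' h hcc => hfm kv' (List.mem_cons_of_mem _ h) hcc)
              (fun kv' h hcc => hfh kv' (List.mem_cons_of_mem _ h) hcc)]
        rw [selC_cons_same multi "v" kv t hc,
            selC_cons_other multi "s" kv t (by rw [hc]; decide),
            selC_cons_other multi "mem" kv t (by rw [hc]; decide),
            selC_cons_other multi "misc" kv t (by rw [hc]; decide)]
        rw [if_pos hmb]
        simp
      · rw [if_neg (show ¬ PySem.Set.contains multi kv.1 = true by rw [hkv1, hc]; exact hmb)]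
        rw [ih av asl am ah h2
              (fun kv' h => hcat kv' (List.mem_cons_of_mem _ h))
              (fun kv' h hcc => hfv kv' (List.mem_cons_of_mem _ h) hcc)
              (fun kv' h hcc => hfs kv' (List.mem_cons_of_mem _ h) hcc)
              (fun kv' h hcc => hfm kv' (List.mem_cons_of_mem _ h) hcc)
              (fun kv' h hcc => hfh kv' (List.mem_cons_of_mem _ h) hcc)]
        rw [selC_cons_same multi "v" kv t hc,
            selC_cons_other multi "s" kv t (by rw [hc]; decide),
            selC_cons_other multi "mem" kv t (by rw [hc]; decide),
            selC_cons_other multi "misc" kv t (by rw [hc]; decide)]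
        rw [if_neg hmb]
    · by_cases hmb : PySem.Set.contains multi (("s", kv.1.2)) = true
      · have hfresh : ∀ kv' ∈ t, kv'.1.1 = "s" → kv'.1.2 ∉ asl ++ [kv.1.2] := by
          intro kv' hkv' hc' hmem
          rcases List.mem_append.mp hmem with hin | hin
          · exact hfs kv' (List.mem_cons_of_mem _ hkv') hc' hin
          · simp only [List.mem_singleton] at hin
            apply h1
            have he1 : kv'.1 = kv.1 := Prod.ext (by rw [hc', hc]) hin
            exact he1 ▸ List.mem_map.mpr ⟨kv', hkv', rfl⟩
        rw [if_pos (show PySem.Set.contains multi kv.1 = true by rw [hkv1, hc]; exact hmb)]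
        rw [hc, modify4_s]
        rw [PySem.Set.add_of_not_mem (hfs kv List.mem_cons_self hc)]
        rw [ih av (asl ++ [kv.1.2]) am ah h2
              (fun kv' h => hcat kv' (List.mem_cons_of_mem _ h))
              (fun kv' h hcc => hfv kv' (List.mem_cons_of_mem _ h) hcc)
              hfresh
              (fun kv' h hcc => hfm kv' (List.mem_cons_of_mem _ h) hcc)
              (fun kv' h hcc => hfh kv' (List.mem_cons_of_mem _ h) hcc)]
        rw [selC_cons_same multi "s" kv t hc,
            selC_cons_other multi "v" kv t (by rw [hc]; decide),
            selC_cons_other multi "mem" kv t (by rw [hc]; decide),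
            selC_cons_other multi "misc" kv t (by rw [hc]; decide)]
        rw [if_pos hmb]
        simp
      · rw [if_neg (show ¬ PySem.Set.contains multi kv.1 = true by rw [hkv1, hc]; exact hmb)]
        rw [ih av asl am ah h2
              (fun kv' h => hcat kv' (List.mem_cons_of_mem _ h))
              (fun kv' h hcc => hfv kv' (List.mem_cons_of_mem _ h) hcc)
              (fun kv' h hcc => hfs kv' (List.mem_cons_of_mem _ h) hcc)
              (fun kv' h hcc => hfm kv' (List.mem_cons_of_mem _ h) hcc)
              (fun kv' h hcc => hfh kv' (List.mem_cons_of_mem _ h) hcc)]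
        rw [selC_cons_same multi "s" kv t hc,
            selC_cons_other multi "v" kv t (by rw [hc]; decide),
            selC_cons_other multi "mem" kv t (by rw [hc]; decide),
            selC_cons_other multi "misc" kv t (by rw [hc]; decide)]
        rw [if_neg hmb]
    · by_cases hmb : PySem.Set.contains multi (("mem", kv.1.2)) = true
      · have hfresh : ∀ kv' ∈ t, kv'.1.1 = "mem" → kv'.1.2 ∉ am ++ [kv.1.2] := by
          intro kv' hkv' hc' hmem
          rcases List.mem_append.mp hmem with hin | hin
          · exact hfm kv' (List.mem_cons_of_mem _ hkv') hc' hin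
          · simp only [List.mem_singleton] at hin
            apply h1
            have he1 : kv'.1 = kv.1 := Prod.ext (by rw [hc', hc]) hin
            exact he1 ▸ List.mem_map.mpr ⟨kv', hkv', rfl⟩
        rw [if_pos (show PySem.Set.contains multi kv.1 = true by rw [hkv1, hc]; exact hmb)]
        rw [hc, modify4_mem]
        rw [PySem.Set.add_of_not_mem (hfm kv List.mem_cons_self hc)]
        rw [ih av asl (am ++ [kv.1.2]) ah h2
              (fun kv' h => hcat kv' (List.mem_cons_of_mem _ h))
              (fun kv' h hcc => hfv kv' (List.mem_cons_of_mem _ h) hcc)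
              (fun kv' h hcc => hfs kv' (List.mem_cons_of_mem _ h) hcc)
              hfresh
              (fun kv' h hcc => hfh kv' (List.mem_cons_of_mem _ h) hcc)]
        rw [selC_cons_same multi "mem" kv t hc,
            selC_cons_other multi "v" kv t (by rw [hc]; decide),
            selC_cons_other multi "s" kv t (by rw [hc]; decide),
            selC_cons_other multi "misc" kv t (by rw [hc]; decide)]
        rw [if_pos hmb]
        simp
      · rw [if_neg (show ¬ PySem.Set.contains multi kv.1 = true by rw [hkv1, hc]; exact hmb)]
        rw [ih av asl am ah h2
              (fun kv' h => hcat kv' (List.mem_cons_of_mem _ h))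
              (fun kv' h hcc => hfv kv' (List.mem_cons_of_mem _ h) hcc)
              (fun kv' h hcc => hfs kv' (List.mem_cons_of_mem _ h) hcc)
              (fun kv' h hcc => hfm kv' (List.mem_cons_of_mem _ h) hcc)
              (fun kv' h hcc => hfh kv' (List.mem_cons_of_mem _ h) hcc)]
        rw [selC_cons_same multi "mem" kv t hc,
            selC_cons_other multi "v" kv t (by rw [hc]; decide),
            selC_cons_other multi "s" kv t (by rw [hc]; decide),
            selC_cons_other multi "misc" kv t (by rw [hc]; decide)]
        rw [if_neg hmb]
    · by_cases hmb : PySem.Set.contains multi (("misc", kv.1.2)) = true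
      · have hfresh : ∀ kv' ∈ t, kv'.1.1 = "misc" → kv'.1.2 ∉ ah ++ [kv.1.2] := by
          intro kv' hkv' hc' hmem
          rcases List.mem_append.mp hmem with hin | hin
          · exact hfh kv' (List.mem_cons_of_mem _ hkv') hc' hin
          · simp only [List.mem_singleton] at hin
            apply h1
            have he1 : kv'.1 = kv.1 := Prod.ext (by rw [hc', hc]) hin
            exact he1 ▸ List.mem_map.mpr ⟨kv', hkv', rfl⟩
        rw [if_pos (show PySem.Set.contains multi kv.1 = true by rw [hkv1, hc]; exact hmb)]
        rw [hc, modify4_misc]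
        rw [PySem.Set.add_of_not_mem (hfh kv List.mem_cons_self hc)]
        rw [ih av asl am (ah ++ [kv.1.2]) h2
              (fun kv' h => hcat kv' (List.mem_cons_of_mem _ h))
              (fun kv' h hcc => hfv kv' (List.mem_cons_of_mem _ h) hcc)
              (fun kv' h hcc => hfs kv' (List.mem_cons_of_mem _ h) hcc)
              (fun kv' h hcc => hfm kv' (List.mem_cons_of_mem _ h) hcc)
              hfresh]
        rw [selC_cons_same multi "misc" kv t hc,
            selC_cons_other multi "v" kv t (by rw [hc]; decide),
            selC_cons_other multi "s" kv t (by rw [hc]; decide),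
            selC_cons_other multi "mem" kv t (by rw [hc]; decide)]
        rw [if_pos hmb]
        simp
      · rw [if_neg (show ¬ PySem.Set.contains multi kv.1 = true by rw [hkv1, hc]; exact hmb)]
        rw [ih av asl am ah h2
              (fun kv' h => hcat kv' (List.mem_cons_of_mem _ h))
              (fun kv' h hcc => hfv kv' (List.mem_cons_of_mem _ h) hcc)
              (fun kv' h hcc => hfs kv' (List.mem_cons_of_mem _ h) hcc)
              (fun kv' h hcc => hfm kv' (List.mem_cons_of_mem _ h) hcc)
              (fun kv' h hcc => hfh kv' (List.mem_cons_of_mem _ h) hcc)]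
        rw [selC_cons_same multi "misc" kv t hc,
            selC_cons_other multi "v" kv t (by rw [hc]; decide),
            selC_cons_other multi "s" kv t (by rw [hc]; decide),
            selC_cons_other multi "mem" kv t (by rw [hc]; decide)]
        rw [if_neg hmb]


-- ===== VERDICT (by name: the statement is the Claim_ definition above) =====
theorem build_typed_bases_spec : Claim_equal_build_typed_bases := by
  intro instructions _hdom _hpre
  unfold Spec_build_typed_bases build_typed_bases build_typed_bases_alt
  have hinv := fold_Inv instructions
    (PySem.Dict.mk [("v", PySem.Dict.empty), ("s", PySem.Dict.empty),
                    ("mem", PySem.Dict.empty), ("misc", PySem.Dict.empty)])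
    (PySem.Dict.empty, PySem.Set.empty)
    (by
      refine ⟨⟨PySem.Dict.empty, PySem.Dict.empty, PySem.Dict.empty, PySem.Dict.empty,
        rfl, ?_, ?_, ?_, ?_⟩, by simp [PySem.Dict.empty], by simp [PySem.Set.empty, PySem.Set.contains], by simp [PySem.Dict.empty]⟩ <;>
        exact ⟨by simp [PySem.Dict.empty, PySem.Dict.keys], by simp [PySem.Dict.empty]⟩)
  obtain ⟨⟨mv, ms, mm, mh, hbEq, hv, hs, hm2, hmi⟩, hnd, hsub, hcats⟩ := hinv
  show ((instructions.foldl buildA_body (PySem.Dict.ofList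
        [("v", PySem.Dict.empty), ("s", PySem.Dict.empty),
         ("mem", PySem.Dict.empty), ("misc", PySem.Dict.empty)])).items.foldl
      (fun typed p => typed.insert p.1 (compA p.2))
      (PySem.Dict.empty : PySem.Dict String (PySem.Set String))).items
    = ((instructions.foldl buildB_body (PySem.Dict.empty, PySem.Set.empty)).1.items.foldl
      (fun typed kv =>
        if PySem.Set.contains (instructions.foldl buildB_body (PySem.Dict.empty, PySem.Set.empty)).2 kv.1 then
          typed.modify kv.1.1 PySem.Set.empty (fun s => PySem.Set.add s kv.1.2)
        else typed)
      (PySem.Dict.ofList [("v", PySem.Set.empty), ("s", PySem.Set.empty),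
        ("mem", PySem.Set.empty), ("misc", PySem.Set.empty)])).items
  rw [show (PySem.Dict.ofList
        [("v", (PySem.Dict.empty : PySem.Dict String (PySem.Set String))), ("s", PySem.Dict.empty),
         ("mem", PySem.Dict.empty), ("misc", PySem.Dict.empty)])
      = PySem.Dict.mk
        [("v", PySem.Dict.empty), ("s", PySem.Dict.empty),
         ("mem", PySem.Dict.empty), ("misc", PySem.Dict.empty)] from rfl]
  rw [hbEq]
  rw [show (PySem.Dict.ofList
        [("v", (PySem.Set.empty : PySem.Set String)), ("s", PySem.Set.empty),
         ("mem", PySem.Set.empty), ("misc", PySem.Set.empty)])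
      = PySem.Dict.mk
        [("v", PySem.Set.empty), ("s", PySem.Set.empty),
         ("mem", PySem.Set.empty), ("misc", PySem.Set.empty)] from rfl]
  have hAfold : ((PySem.Dict.mk [("v", mv), ("s", ms), ("mem", mm), ("misc", mh)]).items.foldl
      (fun typed p => typed.insert p.1 (compA p.2))
      (PySem.Dict.empty : PySem.Dict String (PySem.Set String))).items
      = [("v", compA mv), ("s", compA ms), ("mem", compA mm), ("misc", compA mh)] := by
    simp [PySem.Dict.insert, PySem.Dict.contains, PySem.Dict.empty]
  rw [hAfold]
  have hpass := passB_items (instructions.foldl buildB_body (PySem.Dict.empty, PySem.Set.empty)).2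
      (instructions.foldl buildB_body (PySem.Dict.empty, PySem.Set.empty)).1.items
      PySem.Set.empty PySem.Set.empty PySem.Set.empty PySem.Set.empty
      (by simpa [PySem.Dict.keys] using hnd) hcats
      (by intro kv _ _; simp [PySem.Set.empty])
      (by intro kv _ _; simp [PySem.Set.empty])
      (by intro kv _ _; simp [PySem.Set.empty])
      (by intro kv _ _; simp [PySem.Set.empty])
  rw [hpass]
  rw [compA_eq "v" mv _ _ hv hnd, compA_eq "s" ms _ _ hs hnd,
    compA_eq "mem" mm _ _ hm2 hnd, compA_eq "misc" mh _ _ hmi hnd]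
  simp [PySem.Set.empty]
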